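-- pv_equiv track=rewrite | github.com/ASSERT-KTH/Mokav | experiments/pynguin/c4b/single-return/generated_tests/src_1942/7/src_1942.py | func
-- ===== SOURCE A (Python) =====
-- def func(*args):
--
-- 	k = int(args[0])
-- 	l = int(args[1])
-- 	m = int(args[2])
-- 	n = int(args[3])
-- 	d = int(args[4])
-- 	w = 0
-- 	for x in range(1, (d + 1)):
-- 	    if (((x % k) == 0) or ((x % l) == 0) or ((x % m) == 0) or ((x % n) == 0)):
-- 	        w += 1
-- 	return(w)
-- ===== SOURCE B (Python) =====
-- def func(*args):
-- 	k = int(args[0])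
-- 	l = int(args[1])
-- 	m = int(args[2])
-- 	n = int(args[3])
-- 	d = int(args[4])
-- 	if d < 1:
-- 		return 0
-- 	def gcd(a, b):
-- 		a = abs(a)
-- 		b = abs(b)
-- 		while b:
-- 			a, b = b, a % b
-- 		return a
-- 	def lcm(a, b):
-- 		return abs(a * b) // gcd(a, b)
-- 	kl = lcm(k, l); km = lcm(k, m); kn = lcm(k, n)
-- 	lm = lcm(l, m); ln = lcm(l, n); mn = lcm(m, n)
-- 	klm = lcm(kl, m); kln = lcm(kl, n); kmn = lcm(km, n); lmn = lcm(lm, n)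
-- 	klmn = lcm(klm, n)
-- 	return (d // abs(k) + d // abs(l) + d // abs(m) + d // abs(n)
-- 		- d // kl - d // km - d // kn - d // lm - d // ln - d // mn
-- 		+ d // klm + d // kln + d // kmn + d // lmn
-- 		- d // klmn)
-- ===== Notes on version B (the rewrite author's own statement) =====
-- stated objective: faster
-- what changed: B replaces A's O(d) loop over 1..d testing each x for divisibility with a closed-form inclusion-exclusion sum of floor divisions by the LCMs of the 15 nonempty subsets of {k,l,m,n}.
-- outside the precondition, e.g. on func(-15, 1, 4, 0, 6): A returns 6, B raises ZeroDivisionError; on func(0, 2, 3, 4, 5): A raises ZeroDivisionError, B raises ZeroDivisionError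
import Mathlib
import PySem

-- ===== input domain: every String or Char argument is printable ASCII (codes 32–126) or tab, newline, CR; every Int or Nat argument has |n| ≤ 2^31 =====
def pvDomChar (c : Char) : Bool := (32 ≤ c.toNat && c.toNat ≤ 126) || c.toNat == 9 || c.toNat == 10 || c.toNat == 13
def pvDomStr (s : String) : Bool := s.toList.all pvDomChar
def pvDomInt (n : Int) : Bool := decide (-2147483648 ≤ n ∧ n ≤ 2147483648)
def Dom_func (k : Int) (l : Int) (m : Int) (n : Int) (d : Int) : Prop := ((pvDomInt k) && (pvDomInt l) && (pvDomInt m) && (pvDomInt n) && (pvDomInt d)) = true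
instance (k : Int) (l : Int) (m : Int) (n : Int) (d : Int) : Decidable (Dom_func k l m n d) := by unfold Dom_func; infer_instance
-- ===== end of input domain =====

-- B replaces A's O(d) scan of 1..d with an O(1) inclusion-exclusion formula over LCMs.

-- ===== PORT A =====
def func (k : Int) (l : Int) (m : Int) (n : Int) (d : Int) : Int :=
  (PySem.List.pyRange 1 (d + 1) 1).foldl
    (fun w x =>
      if PySem.Int.mod x k = 0 ∨ PySem.Int.mod x l = 0 ∨ PySem.Int.mod x m = 0 ∨ PySem.Int.mod x n = 0
      then w + 1 else w) 0

-- ===== PORT B =====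
-- Source B's hand-written Euclid on abs values (the while loop), step for step
def pyGcdAux (a b : Nat) : Nat :=
  if h : b = 0 then a else pyGcdAux b (a % b)
  termination_by b
  decreasing_by exact Nat.mod_lt a (Nat.pos_of_ne_zero h)

def pyGcd (a b : Int) : Int := (pyGcdAux a.natAbs b.natAbs : Int)

def pyLcm (a b : Int) : Int := PySem.Int.floordiv ((a * b).natAbs : Int) (pyGcd a b)

def func_alt (k : Int) (l : Int) (m : Int) (n : Int) (d : Int) : Int :=
  if d < 1 then 0
  else
    let kl := pyLcm k l; let km := pyLcm k m; let kn := pyLcm k n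
    let lm := pyLcm l m; let ln := pyLcm l n; let mn := pyLcm m n
    let klm := pyLcm kl m; let kln := pyLcm kl n; let kmn := pyLcm km n; let lmn := pyLcm lm n
    let klmn := pyLcm klm n
    PySem.Int.floordiv d (k.natAbs : Int) + PySem.Int.floordiv d (l.natAbs : Int)
      + PySem.Int.floordiv d (m.natAbs : Int) + PySem.Int.floordiv d (n.natAbs : Int)
      - PySem.Int.floordiv d kl - PySem.Int.floordiv d km - PySem.Int.floordiv d kn
      - PySem.Int.floordiv d lm - PySem.Int.floordiv d ln - PySem.Int.floordiv d mn
      + PySem.Int.floordiv d klm + PySem.Int.floordiv d kln + PySem.Int.floordiv d kmn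
      + PySem.Int.floordiv d lmn
      - PySem.Int.floordiv d klmn

-- ===== PRECONDITION & SPEC =====
-- Pre_ excludes the inputs where a zero divisor is reached (A raises ZeroDivisionError there)
-- and, qualitatively, inputs with d ≥ 1 where a zero among k,l,m,n is shadowed by an earlier
-- divisor of ±1 so that A's short-circuit `or` never evaluates the zero: there A accidentally
-- returns a count while B's inclusion-exclusion (naturally) divides by that zero and raises.
def Pre_func (k : Int) (l : Int) (m : Int) (n : Int) (d : Int) : Prop :=
  d < 1 ∨ (k ≠ 0 ∧ l ≠ 0 ∧ m ≠ 0 ∧ n ≠ 0)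
instance (k : Int) (l : Int) (m : Int) (n : Int) (d : Int) : Decidable (Pre_func k l m n d) := by
  unfold Pre_func; infer_instance

def pvWitness_func : Int × Int × Int × Int × Int := (2, 3, 4, 5, 10)

def Spec_func (k : Int) (l : Int) (m : Int) (n : Int) (d : Int) (out : Int) : Prop := out = func_alt k l m n d
instance (k : Int) (l : Int) (m : Int) (n : Int) (d : Int) (out : Int) : Decidable (Spec_func k l m n d out) := by unfold Spec_func; infer_instance

-- ===== CLAIM (what is proved, stated in full; the proofs are below) =====
def Claim_equal_func : Prop := ∀ (k : Int) (l : Int) (m : Int) (n : Int) (d : Int), Dom_func k l m n d → Pre_func k l m n d → Spec_func k l m n d (func k l m n d)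

-- ===== LEMMAS AND PROOFS =====

theorem pyGcdAux_eq_gcd : ∀ (b a : Nat), pyGcdAux a b = Nat.gcd b a := by
  intro b
  induction b using Nat.strong_induction_on with
  | _ b ih =>
    intro a
    rw [pyGcdAux]
    by_cases h : b = 0
    · simp [h]
    · rw [dif_neg h, ih (a % b) (Nat.mod_lt a (Nat.pos_of_ne_zero h))]
      exact (Nat.gcd_rec b a).symm

theorem pyLcm_eq (a b : Int) : pyLcm a b = (Int.lcm a b : Int) := by
  unfold pyLcm pyGcd
  rw [pyGcdAux_eq_gcd]
  rw [PySem.Int.floordiv_natCast]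
  congr 1
  simp [Int.lcm, Nat.lcm, Int.natAbs_mul, Nat.gcd_comm]

theorem lcm_pos {a b : Int} (ha : a ≠ 0) (hb : b ≠ 0) : (0 : Int) < (Int.lcm a b : Int) := by
  exact_mod_cast Nat.pos_of_ne_zero (fun h => by
      rcases Int.lcm_eq_zero_iff.mp h with h' | h' <;> simp_all)

theorem lcm_dvd_iff' (a b x : Int) : ((Int.lcm a b : Int) ∣ x) ↔ (a ∣ x ∧ b ∣ x) := by
  constructor
  · intro h
    exact ⟨(Int.dvd_lcm_left a b).trans h, (Int.dvd_lcm_right a b).trans h⟩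
  · rintro ⟨h1, h2⟩
    have h1' : a.natAbs ∣ x.natAbs := Int.natAbs_dvd_natAbs.mpr h1
    have h2' : b.natAbs ∣ x.natAbs := Int.natAbs_dvd_natAbs.mpr h2
    have : (Int.lcm a b : Int) ∣ (x.natAbs : Int) :=
      Int.natCast_dvd_natCast.mpr (Nat.lcm_dvd h1' h2')
    exact Int.dvd_natAbs.mp this

-- one step of floor division: (d+1)//g = d//g + [g ∣ d+1], for g > 0
theorem fdiv_succ (g d : Int) (hg : 0 < g) :
    PySem.Int.floordiv (d + 1) g = PySem.Int.floordiv d g + (if g ∣ (d + 1) then 1 else 0) := by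
  rw [PySem.Int.floordiv_eq_ediv_of_pos hg, PySem.Int.floordiv_eq_ediv_of_pos hg]
  obtain ⟨q, r, hqr, h2, h3⟩ : ∃ q r : Int, d + 1 = r + q * g ∧ 0 ≤ r ∧ r < g :=
    ⟨(d + 1) / g, (d + 1) % g,
      by have := Int.ediv_add_emod (d + 1) g; linarith,
      Int.emod_nonneg _ (ne_of_gt hg), Int.emod_lt_of_pos _ hg⟩
  have ha : (d + 1) / g = q := by
    rw [hqr, Int.add_mul_ediv_right _ _ (ne_of_gt hg), Int.ediv_eq_zero_of_lt h2 h3]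
    ring
  by_cases h : g ∣ (d + 1)
  · have hgr : g ∣ r := by
      have := dvd_sub h (Dvd.intro q (mul_comm g q ▸ rfl) : g ∣ q * g)
      rwa [hqr, add_sub_cancel_right] at this
    have hr0 : r = 0 := Int.eq_zero_of_abs_lt_dvd hgr (by rw [abs_of_nonneg h2]; omega)
    have hd2 : d = (g - 1) + (q - 1) * g := by rw [hr0] at hqr; linarith
    rw [if_pos h, ha, hd2, Int.add_mul_ediv_right _ _ (ne_of_gt hg),
      Int.ediv_eq_zero_of_lt (by omega) (by omega)]
    ring
  · have hr0 : r ≠ 0 := by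
      intro hc
      exact h ⟨q, by rw [hqr, hc]; ring⟩
    have hd2 : d = (r - 1) + q * g := by linarith
    rw [if_neg h, ha, hd2, Int.add_mul_ediv_right _ _ (ne_of_gt hg),
      Int.ediv_eq_zero_of_lt (by omega) (by omega)]
    ring

-- inclusion-exclusion for a 4-fold disjunction of indicators
theorem ind4 (A B C D : Prop) [Decidable A] [Decidable B] [Decidable C] [Decidable D] :
    (if A ∨ B ∨ C ∨ D then (1 : Int) else 0) =
      (if A then (1:Int) else 0) + (if B then (1:Int) else 0) + (if C then (1:Int) else 0)
        + (if D then (1:Int) else 0)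
      - (if A ∧ B then (1:Int) else 0) - (if A ∧ C then (1:Int) else 0)
      - (if A ∧ D then (1:Int) else 0) - (if B ∧ C then (1:Int) else 0)
      - (if B ∧ D then (1:Int) else 0) - (if C ∧ D then (1:Int) else 0)
      + (if (A ∧ B) ∧ C then (1:Int) else 0) + (if (A ∧ B) ∧ D then (1:Int) else 0)
      + (if (A ∧ C) ∧ D then (1:Int) else 0) + (if (B ∧ C) ∧ D then (1:Int) else 0)
      - (if ((A ∧ B) ∧ C) ∧ D then (1:Int) else 0) := by
  by_cases hA : A <;> by_cases hB : B <;> by_cases hC : C <;> by_cases hD : D <;>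
    simp [hA, hB, hC, hD]

-- the inclusion-exclusion sum that func_alt computes for d ≥ 1, written over Int.lcm
def exprT (k l m n d : Int) : Int :=
  PySem.Int.floordiv d (k.natAbs : Int) + PySem.Int.floordiv d (l.natAbs : Int)
    + PySem.Int.floordiv d (m.natAbs : Int) + PySem.Int.floordiv d (n.natAbs : Int)
    - PySem.Int.floordiv d (Int.lcm k l : Int) - PySem.Int.floordiv d (Int.lcm k m : Int)
    - PySem.Int.floordiv d (Int.lcm k n : Int) - PySem.Int.floordiv d (Int.lcm l m : Int)
    - PySem.Int.floordiv d (Int.lcm l n : Int) - PySem.Int.floordiv d (Int.lcm m n : Int)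
    + PySem.Int.floordiv d (Int.lcm (Int.lcm k l : Int) m : Int)
    + PySem.Int.floordiv d (Int.lcm (Int.lcm k l : Int) n : Int)
    + PySem.Int.floordiv d (Int.lcm (Int.lcm k m : Int) n : Int)
    + PySem.Int.floordiv d (Int.lcm (Int.lcm l m : Int) n : Int)
    - PySem.Int.floordiv d (Int.lcm (Int.lcm (Int.lcm k l : Int) m : Int) n : Int)

theorem ite_add_one (c : Prop) [Decidable c] (X : Int) :
    (if c then X + 1 else X) = X + (if c then (1:Int) else 0) := by
  split_ifs <;> ring

theorem count_eq (k l m n : Int) (hk : k ≠ 0) (hl : l ≠ 0) (hm : m ≠ 0) (hn : n ≠ 0) :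
    ∀ d : Int, 0 ≤ d → func k l m n d = exprT k l m n d := by
  have hK : (0:Int) < (k.natAbs : Int) := by exact_mod_cast Int.natAbs_pos.mpr hk
  have hL : (0:Int) < (l.natAbs : Int) := by exact_mod_cast Int.natAbs_pos.mpr hl
  have hM : (0:Int) < (m.natAbs : Int) := by exact_mod_cast Int.natAbs_pos.mpr hm
  have hN : (0:Int) < (n.natAbs : Int) := by exact_mod_cast Int.natAbs_pos.mpr hn
  have hkl := lcm_pos hk hl; have hkm := lcm_pos hk hm; have hkn := lcm_pos hk hn
  have hlm := lcm_pos hl hm; have hln := lcm_pos hl hn; have hmn := lcm_pos hm hn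
  have hklm := lcm_pos (ne_of_gt hkl) hm
  have hkln := lcm_pos (ne_of_gt hkl) hn
  have hkmn := lcm_pos (ne_of_gt hkm) hn
  have hlmn := lcm_pos (ne_of_gt hlm) hn
  have hklmn := lcm_pos (ne_of_gt hklm) hn
  intro d hd
  induction d, hd using Int.le_induction with
  | base =>
    unfold func exprT
    rw [PySem.List.pyRange_one_eq_nil (by omega)]
    simp [PySem.Int.floordiv]
  | succ d hd ih =>
    unfold func at ih ⊢
    unfold exprT at ih ⊢
    rw [PySem.List.pyRange_one_succ_right (by omega : (1:Int) ≤ d + 1), List.foldl_append,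
      List.foldl_cons, List.foldl_nil, ih, ite_add_one,
      fdiv_succ _ d hK, fdiv_succ _ d hL, fdiv_succ _ d hM, fdiv_succ _ d hN,
      fdiv_succ _ d hkl, fdiv_succ _ d hkm, fdiv_succ _ d hkn,
      fdiv_succ _ d hlm, fdiv_succ _ d hln, fdiv_succ _ d hmn,
      fdiv_succ _ d hklm, fdiv_succ _ d hkln, fdiv_succ _ d hkmn, fdiv_succ _ d hlmn,
      fdiv_succ _ d hklmn]
    simp only [PySem.Int.mod_eq_zero_iff_dvd, lcm_dvd_iff', Int.natAbs_dvd]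
    rw [ind4 (k ∣ d + 1) (l ∣ d + 1) (m ∣ d + 1) (n ∣ d + 1)]
    ring

-- ===== VERDICT (by name: the statement is the Claim_ definition above) =====
theorem func_spec : Claim_equal_func := by
  intro k l m n d _ hpre
  unfold Spec_func func_alt
  by_cases hd : d < 1
  · rw [if_pos hd]
    unfold func
    rw [PySem.List.pyRange_one_eq_nil (by omega)]
    rfl
  · rw [if_neg hd]
    rcases hpre with hlt | ⟨hk, hl, hm, hn⟩
    · omega
    · simp only [pyLcm_eq]
      rw [count_eq k l m n hk hl hm hn d (by omega)]
      unfold exprT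
      ring
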